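-- pv_equiv track=rewrite | github.com/gnoluyCre/nine_grid_AI | nine_grid/calculator.py | apply_triple_rule
-- ===== SOURCE A (Python) =====
-- from collections import Counter
--
-- def apply_triple_rule(origin_digits: list[int], base_str: str, extra_prefix: str = "") -> dict:
--     counter = Counter(origin_digits)
--     prefix = "".join(str(num) * (counter[num] // 3) for num in sorted(counter.keys()))
--     intermediate = extra_prefix + prefix + base_str
--     suffix_counter = Counter(intermediate[:-1])
--     suffix = "".join(
--         str(num) * (suffix_counter[num] // 3) for num in sorted(suffix_counter.keys())
--     )
--     return {
--         "prefix_digits": prefix,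
--         "base_digits": base_str,
--         "suffix_digits": suffix,
--         "grid": intermediate + suffix,
--     }
-- ===== SOURCE B (Python) =====
-- def apply_triple_rule(origin_digits: list[int], base_str: str, extra_prefix: str = "") -> dict:
--     # Run-length walk over a sorted copy: no Counter, no key set; equal values are
--     # adjacent after sorting, so each run of length r emits its value r//3 times.
--     def _emit(items, to_str):
--         if not items:
--             return ""
--         out = []
--         cur = items[0]
--         run = 1
--         for y in items[1:]:
--             if y == cur:
--                 run += 1
--             else:
--                 out.append(to_str(cur) * (run // 3))
--                 cur = y
--                 run = 1
--         out.append(to_str(cur) * (run // 3))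
--         return "".join(out)
--
--     prefix = _emit(sorted(origin_digits), str)
--     intermediate = extra_prefix + prefix + base_str
--     suffix = _emit(sorted(intermediate[:-1]), str)
--     return {
--         "prefix_digits": prefix,
--         "base_digits": base_str,
--         "suffix_digits": suffix,
--         "grid": intermediate + suffix,
--     }
-- ===== Notes on version B (the rewrite author's own statement) =====
-- stated objective: alternative
-- what changed: Replaces both Counter dictionaries with a single run-length walk over a sorted copy of the input (equal values are adjacent after sorting, each run of length r emits its value r//3 times), so no hash counting and no separate sorted-keys pass.
import Mathlib
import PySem

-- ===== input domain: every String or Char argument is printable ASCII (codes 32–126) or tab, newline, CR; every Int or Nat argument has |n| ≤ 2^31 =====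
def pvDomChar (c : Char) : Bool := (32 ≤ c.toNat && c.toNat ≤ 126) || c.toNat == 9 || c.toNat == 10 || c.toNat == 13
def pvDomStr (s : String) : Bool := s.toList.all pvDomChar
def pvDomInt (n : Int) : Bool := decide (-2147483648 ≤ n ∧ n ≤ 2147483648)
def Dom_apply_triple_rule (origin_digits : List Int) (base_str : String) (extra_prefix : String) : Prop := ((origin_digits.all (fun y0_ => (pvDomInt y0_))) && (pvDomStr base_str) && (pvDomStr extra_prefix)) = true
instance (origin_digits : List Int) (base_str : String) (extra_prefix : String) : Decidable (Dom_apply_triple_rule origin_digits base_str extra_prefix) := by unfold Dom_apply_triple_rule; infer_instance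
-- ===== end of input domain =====

-- B replaces A's two Counter dictionaries by a single run-length walk over a sorted copy (alternative decomposition, same asymptotic cost).

-- shared primitive: Python's  s * n  on strings (n copies, empty for n ≤ 0); exact
def pyRep (cs : List Char) (n : Int) : List Char := (List.replicate n.toNat cs).flatten

-- ===== PORT A =====
def apply_triple_rule (origin_digits : List Int) (base_str : String) (extra_prefix : String) : List (String × String) :=
  let counter := PySem.Dict.counter origin_digits
  let prefixL : List Char :=
    ((PySem.List.sorted counter.keys (fun x => x) false).map
      (fun num => pyRep (PySem.Int.toChars num) (PySem.Int.floordiv (counter.getD num 0) 3))).flatten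
  let intermediate : List Char := extra_prefix.toList ++ prefixL ++ base_str.toList
  let suffix_counter := PySem.Dict.counter (PySem.List.slice intermediate none (some (-1)))
  let suffixL : List Char :=
    ((PySem.List.sorted suffix_counter.keys (fun x => x) false).map
      (fun c => pyRep [c] (PySem.Int.floordiv (suffix_counter.getD c 0) 3))).flatten
  [("prefix_digits", String.ofList prefixL), ("base_digits", base_str),
   ("suffix_digits", String.ofList suffixL), ("grid", String.ofList (intermediate ++ suffixL))]

-- ===== PORT B =====
-- the run-length walk of Source B's _emit: current value x, current run length k
def pvRunGo {α : Type} [BEq α] (toS : α → List Char) (x : α) (k : Nat) : List α → List Char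
  | [] => pyRep (toS x) (PySem.Int.floordiv (k : Int) 3)
  | y :: ys =>
    if y == x then pvRunGo toS x (k + 1) ys
    else pyRep (toS x) (PySem.Int.floordiv (k : Int) 3) ++ pvRunGo toS y 1 ys

def pvRunEmit {α : Type} [BEq α] (toS : α → List Char) : List α → List Char
  | [] => []
  | x :: xs => pvRunGo toS x 1 xs

def apply_triple_rule_alt (origin_digits : List Int) (base_str : String) (extra_prefix : String) : List (String × String) :=
  let prefixL := pvRunEmit PySem.Int.toChars (PySem.List.sorted origin_digits (fun x => x) false)
  let intermediate : List Char := extra_prefix.toList ++ prefixL ++ base_str.toList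
  let suffixL := pvRunEmit (fun c => [c])
      (PySem.List.sorted (PySem.List.slice intermediate none (some (-1))) (fun x => x) false)
  [("prefix_digits", String.ofList prefixL), ("base_digits", base_str),
   ("suffix_digits", String.ofList suffixL), ("grid", String.ofList (intermediate ++ suffixL))]

-- ===== PRECONDITION & SPEC =====
def Spec_apply_triple_rule (origin_digits : List Int) (base_str : String) (extra_prefix : String) (out : List (String × String)) : Prop := out = apply_triple_rule_alt origin_digits base_str extra_prefix
instance (origin_digits : List Int) (base_str : String) (extra_prefix : String) (out : List (String × String)) : Decidable (Spec_apply_triple_rule origin_digits base_str extra_prefix out) := by unfold Spec_apply_triple_rule; infer_instance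

-- ===== CLAIM (what is proved, stated in full; the proofs are below) =====
def Claim_equal_apply_triple_rule : Prop := ∀ (origin_digits : List Int) (base_str : String) (extra_prefix : String), Dom_apply_triple_rule origin_digits base_str extra_prefix → Spec_apply_triple_rule origin_digits base_str extra_prefix (apply_triple_rule origin_digits base_str extra_prefix)

-- ===== LEMMAS AND PROOFS =====

def runKeys {α : Type} [BEq α] : List α → List α
  | [] => []
  | a :: t => a :: runKeys (t.dropWhile (· == a))
termination_by l => l.length
decreasing_by simp only [List.length_cons]; exact Nat.lt_succ_of_le (List.length_dropWhile_le _ _)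

theorem runKeys_subset {α : Type} [BEq α] : ∀ (l : List α), runKeys l ⊆ l
  | [] => by simp [runKeys]
  | a :: t => by
    rw [runKeys]
    intro z hz
    rcases List.mem_cons.mp hz with rfl | hz
    · exact List.mem_cons_self
    · exact List.mem_cons_of_mem _ ((List.dropWhile_sublist _).subset (runKeys_subset _ hz))
termination_by l => l.length
decreasing_by simp only [List.length_cons]; exact Nat.lt_succ_of_le (List.length_dropWhile_le _ _)

theorem dropWhile_gt {α : Type} [LinearOrder α] [BEq α] [LawfulBEq α] (t : List α) (a : α)
    (ht : t.Pairwise (· ≤ ·)) (ha : ∀ y ∈ t, a ≤ y) :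
    ∀ z ∈ t.dropWhile (· == a), a < z := by
  intro z hz
  rcases hd : t.dropWhile (· == a) with _ | ⟨h, r⟩
  · simp [hd] at hz
  · have hh : ¬ (h == a) = true := by
      have := List.head_dropWhile_not (· == a) (l := t) (by simp [hd])
      simpa [hd] using this
    have hha : h ≠ a := by simpa using hh
    have hsub : (t.dropWhile (· == a)).Sublist t := List.dropWhile_sublist _
    have hah : a ≤ h := ha h (hsub.mem (by simp [hd]))
    have hlt : a < h := lt_of_le_of_ne hah (fun e => hha e.symm)
    rw [hd] at hz
    rcases List.mem_cons.mp hz with rfl | hzr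
    · exact hlt
    · have hp : (h :: r).Pairwise (· ≤ ·) := by rw [← hd]; exact ht.sublist hsub
      exact lt_of_lt_of_le hlt ((List.pairwise_cons.mp hp).1 z hzr)

theorem count_dropWhile {α : Type} [LinearOrder α] [BEq α] [LawfulBEq α] (t : List α) (a : α)
    (k : α) (hk : k ≠ a) :
    (t.dropWhile (· == a)).count k = t.count k := by
  conv_rhs => rw [← List.takeWhile_append_dropWhile (p := (· == a)) (l := t)]
  rw [List.count_append]
  have : (t.takeWhile (· == a)).count k = 0 := by
    rw [List.count_eq_zero]
    intro hmem
    exact hk (by simpa using List.mem_takeWhile_imp hmem)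
  omega

theorem go_spec {α : Type} [LinearOrder α] [BEq α] [LawfulBEq α] (toS : α → List Char) :
    ∀ (t : List α) (x : α) (k : Nat), t.Pairwise (· ≤ ·) → (∀ y ∈ t, x ≤ y) →
    pvRunGo toS x k t = pyRep (toS x) (PySem.Int.floordiv ((k + t.count x : Nat) : Int) 3)
      ++ pvRunEmit toS (t.dropWhile (· == x))
  | [], x, k, _, _ => by simp [pvRunGo, pvRunEmit]
  | y :: ys, x, k, ht, hx => by
    rcases List.pairwise_cons.mp ht with ⟨hy, hys⟩
    by_cases h : y = x
    · subst h
      simp only [pvRunGo, beq_self_eq_true, if_true]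
      rw [go_spec toS ys y (k+1) hys hy,
        show List.dropWhile (· == y) (y :: ys) = List.dropWhile (· == y) ys from
          List.dropWhile_cons_of_pos (by simp),
        List.count_cons_self,
        show (k + 1) + ys.count y = k + (ys.count y + 1) from by omega]
    · have hxy : x < y := lt_of_le_of_ne (hx y List.mem_cons_self) (fun e => h e.symm)
      have hcnt : (y :: ys).count x = 0 := by
        rw [List.count_eq_zero]
        intro hmem
        rcases List.mem_cons.mp hmem with rfl | hm
        · exact h rfl
        · exact absurd rfl (ne_of_gt (lt_of_lt_of_le hxy (hy x hm)))
      simp only [pvRunGo]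
      rw [if_neg (by simpa using h), hcnt,
        show List.dropWhile (· == x) (y :: ys) = y :: ys from
          List.dropWhile_cons_of_neg (by simpa using h)]
      rfl

theorem emit_spec {α : Type} [LinearOrder α] [BEq α] [LawfulBEq α] (toS : α → List Char) :
    ∀ (s : List α), s.Pairwise (· ≤ ·) →
    pvRunEmit toS s = ((runKeys s).map
      (fun k => pyRep (toS k) (PySem.Int.floordiv ((s.count k : Nat) : Int) 3))).flatten
  | [], _ => by simp [pvRunEmit, runKeys]
  | a :: t, hs => by
    rcases List.pairwise_cons.mp hs with ⟨ha, ht⟩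
    have ht' : (t.dropWhile (· == a)).Pairwise (· ≤ ·) := ht.sublist (List.dropWhile_sublist _)
    have ih := emit_spec toS (t.dropWhile (· == a)) ht'
    show pvRunGo toS a 1 t = _
    rw [go_spec toS t a 1 ht ha, ih, runKeys]
    simp only [List.map_cons, List.flatten_cons, List.count_cons_self]
    congr 1
    · rw [show 1 + t.count a = t.count a + 1 from by omega]
    · apply congrArg
      apply List.map_congr_left
      intro k hk
      have hkmem : k ∈ t.dropWhile (· == a) := runKeys_subset _ hk
      have hak : a < k := dropWhile_gt t a ht ha k hkmem
      have hc : List.count k (a :: t) = List.count k t := by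
        rw [List.count_cons]
        simp [hak.ne]
      rw [count_dropWhile t a k hak.ne', hc]
termination_by s => s.length
decreasing_by simp only [List.length_cons]; exact Nat.lt_succ_of_le (List.length_dropWhile_le _ _)

theorem runKeys_pairwise {α : Type} [LinearOrder α] [BEq α] [LawfulBEq α] :
    ∀ (s : List α), s.Pairwise (· ≤ ·) → (runKeys s).Pairwise (· < ·)
  | [], _ => by simp [runKeys]
  | a :: t, hs => by
    rcases List.pairwise_cons.mp hs with ⟨ha, ht⟩
    rw [runKeys]
    refine List.pairwise_cons.mpr ⟨?_, runKeys_pairwise _ (ht.sublist (List.dropWhile_sublist _))⟩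
    intro z hz
    exact dropWhile_gt t a ht ha z (runKeys_subset _ hz)
termination_by s => s.length
decreasing_by simp only [List.length_cons]; exact Nat.lt_succ_of_le (List.length_dropWhile_le _ _)

theorem mem_runKeys {α : Type} [LinearOrder α] [BEq α] [LawfulBEq α] :
    ∀ (s : List α), s.Pairwise (· ≤ ·) → ∀ x ∈ s, x ∈ runKeys s
  | a :: t, hs, x, hx => by
    rcases List.pairwise_cons.mp hs with ⟨ha, ht⟩
    rw [runKeys]
    rcases List.mem_cons.mp hx with rfl | hxt
    · exact List.mem_cons_self
    · rcases List.mem_append.mp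
        (by rw [List.takeWhile_append_dropWhile (p := (· == a)) (l := t)]; exact hxt) with htk | hdr
      · have : x = a := by simpa using List.mem_takeWhile_imp htk
        simp [this]
      · exact List.mem_cons_of_mem _
          (mem_runKeys _ (ht.sublist (List.dropWhile_sublist _)) x hdr)
termination_by s => s.length
decreasing_by simp only [List.length_cons]; exact Nat.lt_succ_of_le (List.length_dropWhile_le _ _)

theorem keys_spec {α : Type} [LinearOrder α] [BEq α] [LawfulBEq α] (l : List α) :
    PySem.List.sorted (PySem.Set.ofList l) (fun x => x) false
      = runKeys (PySem.List.sorted l (fun x => x) false) := by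
  have hsort : (PySem.List.sorted l (fun x => x) false).Pairwise (· ≤ ·) :=
    PySem.List.sorted_pairwise l (fun x => x)
  have hpw : (runKeys (PySem.List.sorted l (fun x => x) false)).Pairwise (· < ·) :=
    runKeys_pairwise _ hsort
  refine PySem.List.sorted_eq_of_perm_of_pairwise_lt _ _ _ ?_ hpw
  refine (List.perm_ext_iff_of_nodup (hpw.nodup) (PySem.Set.nodup_ofList l)).mpr ?_
  intro x
  constructor
  · intro hx
    have : x ∈ PySem.List.sorted l (fun x => x) false := runKeys_subset _ hx
    exact (PySem.Set.mem_ofList l x).mpr ((PySem.List.mem_sorted l _ false x).mp this)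
  · intro hx
    exact mem_runKeys _ hsort x
      ((PySem.List.mem_sorted l _ false x).mpr ((PySem.Set.mem_ofList l x).mp hx))

theorem run_eq {α : Type} [LinearOrder α] [BEq α] [LawfulBEq α] (toS : α → List Char) (l : List α) :
    pvRunEmit toS (PySem.List.sorted l (fun x => x) false)
    = ((PySem.List.sorted (PySem.Set.ofList l) (fun x => x) false).map
        (fun k => pyRep (toS k) (PySem.Int.floordiv ((l.count k : Int)) 3))).flatten := by
  rw [emit_spec toS _ (PySem.List.sorted_pairwise l (fun x => x)), keys_spec]
  congr 1
  apply List.map_congr_left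
  intro k _
  rw [(PySem.List.sorted_perm l (fun x => x) false).count_eq]

-- ===== VERDICT (by name: the statement is the Claim_ definition above) =====
theorem apply_triple_rule_spec : Claim_equal_apply_triple_rule := by
  intro od bs ep _
  show _ = _
  unfold apply_triple_rule apply_triple_rule_alt
  simp only [PySem.Dict.keys_counter, PySem.Dict.getD_counter, run_eq]
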